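-- pv_equiv track=rewrite | github.com/biopython/biopython | Bio/Ais/__init__.py | match_sequence
-- ===== SOURCE A (Python) =====
-- def match_sequence( first, second, threshold ):
--     len_first = len( first )
--     len_second = len( second )
--     if( len_first > len_second ):
--         len_min = len_second
--     else:
--         len_min = len_first
--     if( threshold > len_min ):
--         threshold = len_min
--     max_match = 0
--     match_count = 0
--     for j in range( 0, len_min ):
--         if( first[ j ] == second[ j ] ):
--             match_count = match_count + 1
--             if( match_count > max_match ):
--                 max_match = match_count
--         else:
--             match_count = 0
--     if( max_match >= threshold ):
--         return 1
--     else: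
--         return 0
-- ===== SOURCE B (Python) =====
-- def match_sequence(first, second, threshold):
--     len_min = min(len(first), len(second))
--     t = min(threshold, len_min)
--     if t <= 0:
--         return 1
--     ok = any(all(first[i + k] == second[i + k] for k in range(t))
--              for i in range(len_min - t + 1))
--     return 1 if ok else 0
-- ===== Notes on version B (the rewrite author's own statement) =====
-- stated objective: alternative
-- what changed: Instead of tracking a running match counter and its maximum over a single scan, B clamps the threshold and directly tests whether some window of length threshold consists of pairwise-equal characters (any/all over window positions); no maximum is ever computed.
import Mathlib
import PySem

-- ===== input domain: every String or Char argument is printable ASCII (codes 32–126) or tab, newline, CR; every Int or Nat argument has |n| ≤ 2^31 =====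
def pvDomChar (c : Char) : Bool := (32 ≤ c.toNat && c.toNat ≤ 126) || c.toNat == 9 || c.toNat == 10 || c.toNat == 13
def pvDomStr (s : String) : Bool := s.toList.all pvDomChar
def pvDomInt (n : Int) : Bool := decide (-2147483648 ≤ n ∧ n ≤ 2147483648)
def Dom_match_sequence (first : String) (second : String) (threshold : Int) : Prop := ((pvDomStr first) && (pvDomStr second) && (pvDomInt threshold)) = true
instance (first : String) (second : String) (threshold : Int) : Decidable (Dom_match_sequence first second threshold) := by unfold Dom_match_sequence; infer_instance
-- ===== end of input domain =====

-- B replaces A's running match counter + maximum with a direct existence test for a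
-- fully-matching window of the (clamped) threshold length (objective: alternative).

-- ===== PORT A =====
-- Literal port of A: indices j of range(0, len_min) are nonnegative and in range for
-- both strings, so List.range lenMin.toNat with in-range `[j]?` lookups is exact.
def match_sequence (first : String) (second : String) (threshold : Int) : Int :=
  let lenFirst : Int := (first.toList.length : Int)
  let lenSecond : Int := (second.toList.length : Int)
  let lenMin : Int := if lenFirst > lenSecond then lenSecond else lenFirst
  let thr : Int := if threshold > lenMin then lenMin else threshold
  let st : Int × Int := (List.range lenMin.toNat).foldl
    (fun (st : Int × Int) (j : Nat) =>
      if first.toList[j]? == second.toList[j]? then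
        let mc := st.2 + 1
        ((if mc > st.1 then mc else st.1), mc)
      else (st.1, 0)) (0, 0)
  if st.1 ≥ thr then 1 else 0

-- ===== PORT B =====
-- Literal port of B: i + k stays nonnegative and in range for both strings, so
-- in-range `[i+k]?` lookups are exact; range of a nonpositive bound is empty, as in Python.
def match_sequence_alt (first : String) (second : String) (threshold : Int) : Int :=
  let lenMin : Int := min (first.toList.length : Int) (second.toList.length : Int)
  let t : Int := min threshold lenMin
  if t ≤ 0 then 1
  else if (List.range (lenMin - t + 1).toNat).any (fun i =>
        (List.range t.toNat).all (fun k =>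
          first.toList[i + k]? == second.toList[i + k]?)) then 1 else 0

-- ===== PRECONDITION & SPEC =====
def Spec_match_sequence (first : String) (second : String) (threshold : Int) (out : Int) : Prop := out = match_sequence_alt first second threshold
instance (first : String) (second : String) (threshold : Int) (out : Int) : Decidable (Spec_match_sequence first second threshold out) := by unfold Spec_match_sequence; infer_instance

-- ===== CLAIM (what is proved, stated in full; the proofs are below) =====
def Claim_equal_match_sequence : Prop := ∀ (first : String) (second : String) (threshold : Int), Dom_match_sequence first second threshold → Spec_match_sequence first second threshold (match_sequence first second threshold)

-- ===== LEMMAS AND PROOFS =====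

-- A's loop step, on the Bool "first[j] == second[j]", over Int state (max_match, match_count).
def istep (st : Int × Int) (b : Bool) : Int × Int :=
  if b then ((if st.2 + 1 > st.1 then st.2 + 1 else st.1), st.2 + 1) else (st.1, 0)

-- the same step over Nat state
def nstep (st : Nat × Nat) (b : Bool) : Nat × Nat :=
  if b then (max st.1 (st.2 + 1), st.2 + 1) else (st.1, 0)

def bestOf (l : List Bool) : Nat := (l.foldl nstep (0, 0)).1
def trailOf (l : List Bool) : Nat := (l.foldl nstep (0, 0)).2

lemma concat_fold (l : List Bool) (b : Bool) :
    (l ++ [b]).foldl nstep (0, 0) = nstep (l.foldl nstep (0, 0)) b := by simp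

lemma bestOf_concat (l : List Bool) (b : Bool) :
    bestOf (l ++ [b]) = if b then max (bestOf l) (trailOf l + 1) else bestOf l := by
  simp only [bestOf, trailOf, concat_fold, nstep]; cases b <;> simp

lemma trailOf_concat (l : List Bool) (b : Bool) :
    trailOf (l ++ [b]) = if b then trailOf l + 1 else 0 := by
  simp only [bestOf, trailOf, concat_fold, nstep]; cases b <;> simp

lemma trailOf_le_length (l : List Bool) : trailOf l ≤ l.length := by
  induction l using List.reverseRecOn with
  | nil => simp [trailOf, nstep]
  | append_singleton l b ih => rw [trailOf_concat]; cases b <;> simp <;> omega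

lemma bestOf_le_concat (l : List Bool) (b : Bool) : bestOf l ≤ bestOf (l ++ [b]) := by
  rw [bestOf_concat]; cases b <;> simp

-- the last `trailOf l` entries of l are all true
lemma trail_suffix_true (l : List Bool) :
    ∀ k, k < trailOf l → l.getD (l.length - 1 - k) false = true := by
  induction l using List.reverseRecOn with
  | nil => simp [trailOf, nstep]
  | append_singleton l b ih =>
    intro k hk
    cases b with
    | false => rw [trailOf_concat] at hk; simp at hk
    | true =>
      have htc : trailOf (l ++ [true]) = trailOf l + 1 := by rw [trailOf_concat]; simp
      rw [htc] at hk
      rcases Nat.eq_zero_or_pos k with hk0 | hkpos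
      · subst hk0
        simpa using (by simp [List.getD] : (l ++ [true]).getD l.length false = true)
      · have hlen : 1 ≤ l.length := by have := trailOf_le_length l; omega
        have hidx : (l ++ [true]).length - 1 - k = l.length - 1 - (k - 1) := by
          simp only [List.length_append, List.length_singleton]; omega
        rw [hidx, List.getD_append l [true] false _ (by omega)]
        exact ih (k - 1) (by omega)

-- a true suffix of length s forces trailOf l ≥ s
lemma trail_of_suffix (l : List Bool) :
    ∀ s, s ≤ l.length → (∀ k, k < s → l.getD (l.length - 1 - k) false = true) → s ≤ trailOf l := by
  induction l using List.reverseRecOn with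
  | nil =>
    intro s hs _
    have h0 : trailOf [] = 0 := rfl
    simp only [List.length_nil] at hs
    omega
  | append_singleton l b ih =>
    intro s hs hsuf
    have hlb : (l ++ [b]).length = l.length + 1 := by simp
    rcases Nat.eq_zero_or_pos s with hs0 | hspos
    · omega
    · have hb : b = true := by
        have := hsuf 0 hspos
        simpa [List.getD, (by omega : (l ++ [b]).length - 1 - 0 = l.length)] using this
      subst hb
      have htc : trailOf (l ++ [true]) = trailOf l + 1 := by rw [trailOf_concat]; simp
      rw [htc]
      have : s - 1 ≤ trailOf l := by
        apply ih (s - 1) (by omega)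
        intro k hk
        have := hsuf (k + 1) (by omega)
        rwa [(by simp; omega : (l ++ [true]).length - 1 - (k + 1) = l.length - 1 - k),
             List.getD_append l [true] false _ (by omega)] at this
      omega

-- the key characterisation: a run of length ≥ t exists iff A's maximum reaches t
lemma best_ge_iff (l : List Bool) (t : Nat) (ht : 1 ≤ t) :
    t ≤ bestOf l ↔ ∃ i, i + t ≤ l.length ∧ ∀ k, k < t → l.getD (i + k) false = true := by
  induction l using List.reverseRecOn with
  | nil =>
    simp only [bestOf, List.foldl_nil, List.length_nil]
    constructor
    · intro h; omega
    · rintro ⟨i, hi, -⟩; omega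
  | append_singleton l b ih =>
    constructor
    · intro h
      by_cases hbl : t ≤ bestOf l
      · obtain ⟨i, hi, hall⟩ := ih.mp hbl
        refine ⟨i, by simp; omega, fun k hk => ?_⟩
        rw [List.getD_append l [b] false _ (by omega)]
        exact hall k hk
      · have hb : b = true := by
          by_contra hb'
          simp only [Bool.not_eq_true] at hb'
          subst hb'
          rw [bestOf_concat] at h; simp at h; omega
        subst hb
        have hbc : bestOf (l ++ [true]) = max (bestOf l) (trailOf l + 1) := by
          rw [bestOf_concat]; simp
        rw [hbc] at h
        have htr : t - 1 ≤ trailOf l := by omega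
        have hlen := trailOf_le_length l
        refine ⟨l.length + 1 - t, by simp; omega, fun k hk => ?_⟩
        rcases Nat.lt_or_ge (l.length + 1 - t + k) l.length with hlt | hge
        · rw [List.getD_append l [true] false _ hlt]
          have : l.length - 1 - (l.length + 1 - t + k) < trailOf l := by omega
          have := trail_suffix_true l _ this
          rwa [(by omega : l.length - 1 - (l.length - 1 - (l.length + 1 - t + k)) = l.length + 1 - t + k)] at this
        · have : l.length + 1 - t + k = l.length := by omega
          rw [this]; simp [List.getD]
    · rintro ⟨i, hi, hall⟩
      simp only [List.length_append, List.length_singleton] at hi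
      rcases Nat.lt_or_ge (i + t) (l.length + 1) with hlt | hge
      · have : t ≤ bestOf l := by
          apply ih.mpr
          refine ⟨i, by omega, fun k hk => ?_⟩
          have := hall k hk
          rwa [List.getD_append l [b] false _ (by omega)] at this
        exact le_trans this (bestOf_le_concat l b)
      · have hit : i + t = l.length + 1 := by omega
        have hb : b = true := by
          have := hall (t - 1) (by omega)
          rwa [(by omega : i + (t - 1) = l.length), (by simp [List.getD] : (l ++ [b]).getD l.length false = b)] at this
        subst hb
        have htr : t - 1 ≤ trailOf l := by
          apply trail_of_suffix l (t - 1) (by omega)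
          intro k hk
          have := hall (t - 2 - k) (by omega)
          rwa [(by omega : i + (t - 2 - k) = l.length - 1 - k),
               List.getD_append l [true] false _ (by omega)] at this
        have hbc : bestOf (l ++ [true]) = max (bestOf l) (trailOf l + 1) := by
          rw [bestOf_concat]; simp
        rw [hbc]
        omega

-- bridging A's Int-state fold to the Nat-state fold
lemma fold_cast (l : List Bool) : ∀ (mx cnt : Nat),
    l.foldl istep ((mx : Int), (cnt : Int)) =
      (((l.foldl nstep (mx, cnt)).1 : Int), ((l.foldl nstep (mx, cnt)).2 : Int)) := by
  induction l with
  | nil => intro mx cnt; simp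
  | cons b l ih =>
    intro mx cnt
    cases b with
    | false => simpa [istep, nstep] using ih mx 0
    | true =>
      have hi : istep ((mx : Int), (cnt : Int)) true
          = (((max mx (cnt + 1) : Nat) : Int), (((cnt + 1 : Nat)) : Int)) := by
        unfold istep
        rw [if_pos rfl, Prod.mk.injEq]
        refine ⟨?_, by push_cast; ring⟩
        split_ifs <;> push_cast <;> omega
      have hn : nstep (mx, cnt) true = (max mx (cnt + 1), cnt + 1) := by
        simp [nstep]
      simp only [List.foldl_cons, hi, hn]
      exact ih _ _

-- the Bool A compares at position j equals the zipWith match stream at j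
lemma zip_get (fc sc : List Char) (j : Nat) (h1 : j < fc.length) (h2 : j < sc.length) :
    (fc[j]? == sc[j]?) = (List.zipWith (fun a b => a == b) fc sc).getD j false := by
  simp [h1, h2, List.getD]

-- fold over indices of l, reading l.getD, is the fold over l
lemma foldl_range_getD {σ : Type} (f : σ → Bool → σ) (l : List Bool) (init : σ) :
    (List.range l.length).foldl (fun s j => f s (l.getD j false)) init = l.foldl f init := by
  induction l using List.reverseRecOn generalizing init with
  | nil => simp
  | append_singleton l b ih =>
    rw [(by simp : (l ++ [b]).length = l.length + 1), List.range_succ, List.foldl_append,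
        List.foldl_append]
    have hcongr : (List.range l.length).foldl (fun s j => f s ((l ++ [b]).getD j false)) init =
        (List.range l.length).foldl (fun s j => f s (l.getD j false)) init := by
      apply List.foldl_ext
      intro s j hj
      rw [List.getD_append l [b] false j (List.mem_range.mp hj)]
    rw [hcongr, ih]
    simp [List.getD]

lemma any_window_iff (fc sc : List Char) (tn : Nat) (ht : 1 ≤ tn)
    (htn : tn ≤ min fc.length sc.length) :
    ((List.range (min fc.length sc.length - tn + 1)).any (fun i =>
        (List.range tn).all (fun k => fc[i + k]? == sc[i + k]?)) = true) ↔
      tn ≤ bestOf (List.zipWith (fun a b => a == b) fc sc) := by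
  set l := List.zipWith (fun a b => a == b) fc sc with hl
  have hlen : l.length = min fc.length sc.length := by simp [hl]
  rw [best_ge_iff l tn ht]
  simp only [List.any_eq_true, List.all_eq_true, List.mem_range]
  constructor
  · rintro ⟨i, hi, hall⟩
    refine ⟨i, by omega, fun k hk => ?_⟩
    rw [← zip_get fc sc (i + k) (by omega) (by omega)]
    exact hall k hk
  · rintro ⟨i, hi, hall⟩
    rw [hlen] at hi
    refine ⟨i, by omega, fun k hk => ?_⟩
    rw [zip_get fc sc (i + k) (by omega) (by omega)]
    exact hall k hk

-- ===== VERDICT (by name: the statement is the Claim_ definition above) =====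
theorem match_sequence_spec : Claim_equal_match_sequence := by
  intro first second threshold _
  unfold Spec_match_sequence match_sequence match_sequence_alt
  set fc := first.toList with hfc
  set sc := second.toList with hsc
  set l := List.zipWith (fun a b => a == b) fc sc with hl
  have hlen : l.length = min fc.length sc.length := by simp [hl]
  have hminI : (if (fc.length : Int) > (sc.length : Int) then (sc.length : Int) else (fc.length : Int))
      = min (fc.length : Int) (sc.length : Int) := by split_ifs <;> omega
  simp only [hminI]
  have hminN : (min (fc.length : Int) (sc.length : Int)).toNat = l.length := by
    rw [hlen]; omega
  -- rewrite A's fold into bestOf l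
  have hbody : (fun (st : Int × Int) (j : Nat) =>
      if fc[j]? == sc[j]? then
        let mc := st.2 + 1
        ((if mc > st.1 then mc else st.1), mc)
      else (st.1, 0)) = fun st j => istep st (fc[j]? == sc[j]?) := by
    funext st j; simp [istep]
  have hfoldA : (List.range (min (fc.length : Int) (sc.length : Int)).toNat).foldl
      (fun (st : Int × Int) (j : Nat) =>
        if fc[j]? == sc[j]? then
          let mc := st.2 + 1
          ((if mc > st.1 then mc else st.1), mc)
        else (st.1, 0)) (0, 0) = ((bestOf l : Int), (trailOf l : Int)) := by
    rw [hbody, hminN]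
    have hc : (List.range l.length).foldl (fun st j => istep st (fc[j]? == sc[j]?)) (0, 0) =
        (List.range l.length).foldl (fun st j => istep st (l.getD j false)) (0, 0) := by
      apply List.foldl_ext
      intro s j hj
      have hj' := List.mem_range.mp hj
      rw [zip_get fc sc j (by omega) (by omega)]
    rw [hc, foldl_range_getD istep l (0, 0)]
    have := fold_cast l 0 0
    simpa [bestOf, trailOf] using this
  rw [hfoldA]
  set lenMin : Int := min (fc.length : Int) (sc.length : Int) with hlm
  have hthr : (if threshold > lenMin then lenMin else threshold) = min threshold lenMin := by
    split_ifs <;> omega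
  simp only [hthr]
  set t : Int := min threshold lenMin with hts
  by_cases hle : t ≤ 0
  · rw [if_pos hle, if_pos (by omega : (bestOf l : Int) ≥ t)]
  · rw [if_neg hle]
    have ht1 : 1 ≤ t.toNat := by omega
    have hmin : lenMin = min ((fc.length : Int)) ((sc.length : Int)) := hlm
    have htle : t ≤ lenMin := min_le_right _ _
    have htn : t.toNat ≤ min fc.length sc.length := by omega
    have hidx : (lenMin - t + 1).toNat = min fc.length sc.length - t.toNat + 1 := by omega
    rw [hidx]
    rcases (any_window_iff fc sc t.toNat ht1 htn) with ⟨hmp, hmpr⟩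
    rw [← hl] at hmp hmpr
    by_cases hwin : (List.range (min fc.length sc.length - t.toNat + 1)).any (fun i =>
        (List.range t.toNat).all (fun k => fc[i + k]? == sc[i + k]?)) = true
    · rw [if_pos hwin, if_pos (by have := hmp hwin; omega)]
    · rw [if_neg hwin, if_neg (by intro hge; exact hwin (hmpr (by omega)))]
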